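-- pv_equiv track=rewrite | github.com/lucifer046/Python-DSA-Collection | Greedy_Algorithms/minimize_lateness.py | calculate_minimum_lateness_schedule
-- ===== SOURCE A (Python) =====
-- from operator import itemgetter
--
-- def calculate_minimum_lateness_schedule(list_of_jobs):
--     """
--     This function takes a list of jobs and arranges them in a way that
--     nobody is 'too late' compared to everyone else.
--     """
--     # This list will store the result: (Job ID, Start Time, End Time)
--     final_schedule = []
--
--     # We will track the biggest 'lateness' value we find
--     maximum_lateness_found = 0
--
--     # 'current_time' tracks when the single worker is free to start the next job
--     current_time = 0
--
--     # 1. First, we sort the jobs by their DEADLINE (the 3rd item in our tuple, index 2)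
--     # This is our 'Earliest Deadline First' strategy!
--     jobs_sorted_by_deadline = sorted(list_of_jobs, key=itemgetter(2))
--
--     # 2. Now we process each job one by one in the sorted order
--     for job_details in jobs_sorted_by_deadline:
--         # Variables for better readability:
--         job_id = job_details[0]           # The unique ID of the job
--         job_duration = job_details[1]     # How long the job takes
--         job_deadline = job_details[2]     # When it SHOULD be done
--
--         # The job starts as soon as we finish the previous one
--         job_start_time = current_time
--         # It finishes after its duration is added to the start time
--         job_finish_time = current_time + job_duration
--
--         # Update our tracker: The worker is now busy until this finish time
--         current_time = job_finish_time
--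
--         # 3. Check if the job is late:
--         # Lateness = (Finish Time - Deadline). If it's done before deadline, lateness is 0.
--         if job_finish_time > job_deadline:
--             lateness_for_this_job = job_finish_time - job_deadline
--             # We only remember the BIGGEST lateness value we've seen so far
--             maximum_lateness_found = max(maximum_lateness_found, lateness_for_this_job)
--
--         # Add the job's timing to our final schedule list
--         final_schedule.append((job_id, job_start_time, job_finish_time))
--
--     # Return both the maximum lateness found and the full schedule
--     return maximum_lateness_found, final_schedule
-- ===== SOURCE B (Python) =====
-- def calculate_minimum_lateness_schedule(list_of_jobs):
--     """
--     Selection-based EDF scheduler: instead of sorting, repeatedly extract the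
--     remaining job with the earliest deadline (min with key, first on ties) and
--     schedule it next, accumulating start/finish times and the maximum lateness.
--     """
--     remaining = list(list_of_jobs)
--     schedule = []
--     maximum_lateness = 0
--     current_time = 0
--     while remaining:
--         job = min(remaining, key=lambda j: j[2])
--         remaining.remove(job)
--         job_id, duration, deadline = job
--         finish_time = current_time + duration
--         schedule.append((job_id, current_time, finish_time))
--         maximum_lateness = max(maximum_lateness, finish_time - deadline)
--         current_time = finish_time
--     return maximum_lateness, schedule
-- ===== Notes on version B (the rewrite author's own statement) =====
-- stated objective: alternative
-- what changed: Replaces A's sort-then-scan (sorted by deadline, then one accumulator loop) by a selection-based scheduler with no sort call: repeatedly extract the remaining job with the earliest deadline via min(..., key=...) and list.remove, scheduling it next and updating the running maximum lateness unconditionally.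
import Mathlib
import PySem

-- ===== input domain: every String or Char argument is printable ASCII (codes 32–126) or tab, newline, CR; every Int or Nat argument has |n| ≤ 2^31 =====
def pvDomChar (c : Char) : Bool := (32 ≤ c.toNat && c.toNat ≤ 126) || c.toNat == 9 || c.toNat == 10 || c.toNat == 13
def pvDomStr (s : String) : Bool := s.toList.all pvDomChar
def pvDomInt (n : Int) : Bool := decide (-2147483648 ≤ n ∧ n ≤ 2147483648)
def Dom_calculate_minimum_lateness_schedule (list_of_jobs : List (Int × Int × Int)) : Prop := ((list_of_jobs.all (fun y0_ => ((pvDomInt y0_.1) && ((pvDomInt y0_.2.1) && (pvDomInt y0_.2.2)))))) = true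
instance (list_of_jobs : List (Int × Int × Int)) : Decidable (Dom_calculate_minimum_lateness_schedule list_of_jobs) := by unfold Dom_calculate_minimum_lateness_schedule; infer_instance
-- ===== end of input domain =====

-- B replaces A's sort-then-scan by a selection-based scheduler: it repeatedly
-- extracts the remaining job with the earliest deadline (min with key) and
-- schedules it next — no sort call (alternative algorithm, same return value).

-- ===== PORT A =====
def calculate_minimum_lateness_schedule (list_of_jobs : List (Int × Int × Int)) : Int × (List (Int × Int × Int)) :=
  let jobs_sorted_by_deadline := PySem.List.sorted list_of_jobs (fun j => j.2.2) false
  let st := jobs_sorted_by_deadline.foldl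
    (fun (st : Int × List (Int × Int × Int) × Int) job_details =>
      let job_start_time := st.2.2
      let job_finish_time := st.2.2 + job_details.2.1
      let maxL := if job_finish_time > job_details.2.2
                  then max st.1 (job_finish_time - job_details.2.2)
                  else st.1
      (maxL, st.2.1 ++ [(job_details.1, job_start_time, job_finish_time)], job_finish_time))
    (0, [], 0)
  (st.1, st.2.1)

-- ===== PORT B =====
-- the 'while remaining:' loop; state = (remaining, schedule, maximum_lateness, current_time).
-- min(remaining, key=lambda j: j[2]) is PySem.List.min? (first minimum, as in Python);
-- remaining.remove(job): job ∈ remaining (PySem.List.min?_mem), so remove? succeeds and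
-- deletes the first occurrence, i.e. List.erase.
def pvSelLoop (remaining schedule : List (Int × Int × Int)) (maximum_lateness current_time : Int) : Int × (List (Int × Int × Int)) :=
  match h : PySem.List.min? remaining (fun j => j.2.2) with
  | none => (maximum_lateness, schedule)
  | some job =>
      pvSelLoop (remaining.erase job)
        (schedule ++ [(job.1, current_time, current_time + job.2.1)])
        (max maximum_lateness (current_time + job.2.1 - job.2.2))
        (current_time + job.2.1)
termination_by remaining.length
decreasing_by
  have hm := PySem.List.min?_mem h
  have h1 := List.length_erase_of_mem hm
  have h2 := List.length_pos_of_mem hm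
  omega

def calculate_minimum_lateness_schedule_alt (list_of_jobs : List (Int × Int × Int)) : Int × (List (Int × Int × Int)) :=
  pvSelLoop list_of_jobs [] 0 0

-- ===== PRECONDITION & SPEC =====
def Spec_calculate_minimum_lateness_schedule (list_of_jobs : List (Int × Int × Int)) (out : Int × (List (Int × Int × Int))) : Prop := out = calculate_minimum_lateness_schedule_alt list_of_jobs
instance (list_of_jobs : List (Int × Int × Int)) (out : Int × (List (Int × Int × Int))) : Decidable (Spec_calculate_minimum_lateness_schedule list_of_jobs out) := by unfold Spec_calculate_minimum_lateness_schedule; infer_instance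

-- ===== CLAIM (what is proved, stated in full; the proofs are below) =====
def Claim_equal_calculate_minimum_lateness_schedule : Prop := ∀ (list_of_jobs : List (Int × Int × Int)), Dom_calculate_minimum_lateness_schedule list_of_jobs → Spec_calculate_minimum_lateness_schedule list_of_jobs (calculate_minimum_lateness_schedule list_of_jobs)

-- ===== LEMMAS AND PROOFS =====

-- min over xs ++ [x] in terms of min over xs
theorem pv_min_snoc (xs : List (Int × Int × Int)) (x : Int × Int × Int) :
    PySem.List.min? (xs ++ [x]) (fun j => j.2.2) =
      match PySem.List.min? xs (fun j => j.2.2) with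
      | none => some x
      | some m => if x.2.2 < m.2.2 then some x else some m := by
  unfold PySem.List.min?
  rw [List.foldl_append]
  simp only [List.foldl_cons, List.foldl_nil]
  generalize List.foldl _ none xs = acc
  cases acc <;> rfl

-- stable insertion sort consumes its input left to right
theorem pv_sorted_snoc (xs : List (Int × Int × Int)) (x : Int × Int × Int) :
    PySem.List.sorted (xs ++ [x]) (fun j => j.2.2) false =
      PySem.List.insertBy (fun a b => decide (a.2.2 < b.2.2)) x (PySem.List.sorted xs (fun j => j.2.2) false) := by
  rw [PySem.List.sorted_eq_foldl_insertBy, PySem.List.sorted_eq_foldl_insertBy, List.foldl_append]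
  rfl

theorem pv_insertBy_front (before : (Int × Int × Int) → (Int × Int × Int) → Bool)
    (x : Int × Int × Int) (ys : List (Int × Int × Int)) (h : ∀ y ∈ ys, before x y = true) :
    PySem.List.insertBy before x ys = x :: ys := by
  cases ys with
  | nil => rfl
  | cons y ys =>
    have e : PySem.List.insertBy before x (y :: ys)
        = if before x y = true then x :: y :: ys else y :: PySem.List.insertBy before x ys := rfl
    rw [e, if_pos (h y (by simp))]

theorem pv_insertBy_skip (before : (Int × Int × Int) → (Int × Int × Int) → Bool)
    (x y : Int × Int × Int) (ys : List (Int × Int × Int)) (h : before x y = false) :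
    PySem.List.insertBy before x (y :: ys) = y :: PySem.List.insertBy before x ys := by
  have e : PySem.List.insertBy before x (y :: ys)
      = if before x y = true then x :: y :: ys else y :: PySem.List.insertBy before x ys := rfl
  rw [e, if_neg (by simp [h])]

-- head of the stable sort is the FIRST argmin, and the tail is the stable sort
-- of the list with that occurrence erased
theorem pv_sorted_min_cons (xs : List (Int × Int × Int)) :
    ∀ m, PySem.List.min? xs (fun j => j.2.2) = some m →
      PySem.List.sorted xs (fun j => j.2.2) false
        = m :: PySem.List.sorted (xs.erase m) (fun j => j.2.2) false := by
  induction xs using List.reverseRecOn with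
  | nil => intro m h; simp [PySem.List.min?] at h
  | append_singleton xs x ih =>
    intro m h
    rw [pv_min_snoc] at h
    rw [pv_sorted_snoc]
    cases hx : PySem.List.min? xs (fun j => j.2.2) with
    | none =>
      have hxs : xs = [] := (PySem.List.min?_eq_none_iff _ _).mp hx
      subst hxs
      rw [hx] at h
      simp only at h
      injection h with h; subst h
      simp only [List.nil_append, List.erase_cons_head]
      rfl
    | some m' =>
      rw [hx] at h
      simp only at h
      by_cases hlt : x.2.2 < m'.2.2
      · rw [if_pos hlt] at h
        injection h with h; subst h
        have hnot : x ∉ xs := fun hmem => absurd (PySem.List.min?_isMin hx x hmem) (by omega)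
        rw [List.erase_append_right _ hnot]
        simp only [List.erase_cons_head, List.append_nil]
        apply pv_insertBy_front
        intro y hy
        have hy' : y ∈ xs := (PySem.List.mem_sorted _ _ _ _).mp hy
        have := PySem.List.min?_isMin hx y hy'
        simp only [decide_eq_true_eq]
        omega
      · rw [if_neg hlt] at h
        injection h with h; subst h
        have hmem : m' ∈ xs := PySem.List.min?_mem hx
        rw [List.erase_append_left _ hmem, ih m' hx,
            pv_insertBy_skip _ _ _ _ (by simp only [decide_eq_false_iff_not]; omega),
            ← pv_sorted_snoc]

-- the unconditional-max step both loops reduce to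
def pvStep (st : Int × List (Int × Int × Int) × Int) (j : Int × Int × Int) : Int × List (Int × Int × Int) × Int :=
  (max st.1 (st.2.2 + j.2.1 - j.2.2), st.2.1 ++ [(j.1, st.2.2, st.2.2 + j.2.1)], st.2.2 + j.2.1)

theorem pvSelLoop_none {r sched : List (Int × Int × Int)} {m cur : Int}
    (h : PySem.List.min? r (fun j => j.2.2) = none) : pvSelLoop r sched m cur = (m, sched) := by
  rw [pvSelLoop.eq_def]
  split
  · rfl
  · rename_i j hj; rw [h] at hj; exact absurd hj (by simp)

theorem pvSelLoop_some {r sched : List (Int × Int × Int)} {m cur : Int} {job : Int × Int × Int}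
    (h : PySem.List.min? r (fun j => j.2.2) = some job) :
    pvSelLoop r sched m cur =
      pvSelLoop (r.erase job) (sched ++ [(job.1, cur, cur + job.2.1)])
        (max m (cur + job.2.1 - job.2.2)) (cur + job.2.1) := by
  rw [pvSelLoop.eq_def]
  split
  · rename_i hj; rw [h] at hj; exact absurd hj (by simp)
  · rename_i j hj; rw [h] at hj; injection hj with hj; subst hj; rfl

-- the selection loop computes the fold of pvStep over the sorted list
theorem pv_selLoop_sorted (n : Nat) :
    ∀ (r : List (Int × Int × Int)), r.length ≤ n → ∀ (sched : List (Int × Int × Int)) (m cur : Int),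
      pvSelLoop r sched m cur =
        (((PySem.List.sorted r (fun j => j.2.2) false).foldl pvStep (m, sched, cur)).1,
         ((PySem.List.sorted r (fun j => j.2.2) false).foldl pvStep (m, sched, cur)).2.1) := by
  induction n with
  | zero =>
    intro r hr sched m cur
    have : r = [] := List.length_eq_zero_iff.mp (Nat.le_zero.mp hr)
    subst this
    rw [pvSelLoop_none rfl]
    rfl
  | succ n ih =>
    intro r hr sched m cur
    cases hmin : PySem.List.min? r (fun j => j.2.2) with
    | none =>
      have : r = [] := (PySem.List.min?_eq_none_iff _ _).mp hmin
      subst this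
      rw [pvSelLoop_none rfl]
      rfl
    | some job =>
      have hmem := PySem.List.min?_mem hmin
      have hlen : (r.erase job).length ≤ n := by
        have h1 := List.length_erase_of_mem hmem
        have h2 := List.length_pos_of_mem hmem
        omega
      rw [pvSelLoop_some hmin, pv_sorted_min_cons r job hmin, List.foldl_cons, ih _ hlen]
      rfl

-- with a nonnegative running maximum, A's guarded update equals the plain max
theorem pv_clamp (s : List (Int × Int × Int)) :
    ∀ (m : Int) (sched : List (Int × Int × Int)) (cur : Int), 0 ≤ m →
      s.foldl
        (fun (st : Int × List (Int × Int × Int) × Int) job_details =>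
          let job_start_time := st.2.2
          let job_finish_time := st.2.2 + job_details.2.1
          let maxL := if job_finish_time > job_details.2.2
                      then max st.1 (job_finish_time - job_details.2.2)
                      else st.1
          (maxL, st.2.1 ++ [(job_details.1, job_start_time, job_finish_time)], job_finish_time))
        (m, sched, cur)
      = s.foldl pvStep (m, sched, cur) := by
  induction s with
  | nil => intro m sched cur _; rfl
  | cons j s ih =>
    intro m sched cur hm
    simp only [List.foldl_cons, pvStep]
    by_cases h : cur + j.2.1 > j.2.2
    · rw [if_pos h]
      exact ih _ _ _ (le_trans hm (le_max_left _ _))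
    · have e2 : max m (cur + j.2.1 - j.2.2) = m := max_eq_left (by omega)
      simp only [e2, ite_self]
      exact ih _ _ _ hm

-- ===== VERDICT (by name: the statement is the Claim_ definition above) =====
theorem calculate_minimum_lateness_schedule_spec : Claim_equal_calculate_minimum_lateness_schedule := by
  intro list_of_jobs _
  unfold Spec_calculate_minimum_lateness_schedule
  unfold calculate_minimum_lateness_schedule calculate_minimum_lateness_schedule_alt
  simp only
  rw [pv_clamp _ 0 [] 0 le_rfl, pv_selLoop_sorted list_of_jobs.length list_of_jobs le_rfl]
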